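-- pv_equiv track=rewrite | github.com/andrewjpage/tiptoft | plasmidpredictor/Blocks.py | find_all_blocks
-- ===== SOURCE A (Python) =====
-- def find_all_blocks(sequence_hits):
-- 	blocks = []
-- 	in_block = False
-- 	current_block_start = 0
-- 	for i,val_count in enumerate(sequence_hits):
--
-- 		if not in_block and val_count > 0:
-- 			in_block = True
-- 			current_block_start = i
-- 		elif in_block and val_count == 0:
-- 			in_block = False
-- 			blocks.append([current_block_start, i])
--
-- 	if in_block:
-- 		blocks.append([current_block_start, len(sequence_hits)])
--
-- 	return blocks
-- ===== SOURCE B (Python) =====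
-- def find_all_blocks(sequence_hits):
--     n = len(sequence_hits)
--     blocks = []
--     i = 0
--     while i < n:
--         if sequence_hits[i] > 0:
--             j = i + 1
--             while j < n and sequence_hits[j] != 0:
--                 j += 1
--             blocks.append([i, j])
--             i = j + 1
--         else:
--             i += 1
--     return blocks
-- ===== Notes on version B (the rewrite author's own statement) =====
-- stated objective: alternative
-- what changed: Replaces the single stateful pass with an in_block flag and trailing append by an index-jumping outer scan that finds the next positive start and an inner scan that runs to the first zero (or the end), emitting each block immediately.
import Mathlib
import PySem

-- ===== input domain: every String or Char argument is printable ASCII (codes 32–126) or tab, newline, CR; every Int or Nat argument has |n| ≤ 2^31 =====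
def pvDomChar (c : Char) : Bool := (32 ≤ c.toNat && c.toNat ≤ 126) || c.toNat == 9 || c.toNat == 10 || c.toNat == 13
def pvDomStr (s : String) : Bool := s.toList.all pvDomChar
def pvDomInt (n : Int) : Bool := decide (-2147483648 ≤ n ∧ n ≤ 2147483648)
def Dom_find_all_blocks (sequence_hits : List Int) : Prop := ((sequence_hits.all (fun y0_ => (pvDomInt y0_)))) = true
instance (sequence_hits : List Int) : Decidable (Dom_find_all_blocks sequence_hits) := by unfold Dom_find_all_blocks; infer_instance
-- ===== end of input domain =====

-- B replaces A's single stateful pass (in_block flag + trailing append) with an outer scan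
-- that jumps to the next positive start and an inner scan to the first zero; alternative decomposition, same cost.


-- ===== PORT A =====
-- A's for-loop over enumerate(sequence_hits) with state (blocks, in_block, current_block_start)
def aLoop (blocks : List (List Int)) (in_block : Bool) (current_block_start : Int) (i : Int) :
    List Int → List (List Int) × Bool × Int
  | [] => (blocks, in_block, current_block_start)
  | val_count :: rest =>
    if in_block = false ∧ 0 < val_count then
      aLoop blocks true i (i + 1) rest
    else if in_block = true ∧ val_count = 0 then
      aLoop (blocks ++ [[current_block_start, i]]) false current_block_start (i + 1) rest
    else
      aLoop blocks in_block current_block_start (i + 1) rest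

def find_all_blocks (sequence_hits : List Int) : List (List Int) :=
  let r := aLoop [] false 0 0 sequence_hits
  if r.2.1 then r.1 ++ [[r.2.2, (sequence_hits.length : Int)]] else r.1

-- ===== PORT B =====
-- inner while: advance j past nonzero values, return (first zero index or end, remaining list after it)
def altInner : List Int → Int → Int × List Int
  | [], j => (j, [])
  | v :: rest, j => if v ≠ 0 then altInner rest (j + 1) else (j, rest)

theorem altInner_len (l : List Int) (j : Int) : (altInner l j).2.length ≤ l.length := by
  induction l generalizing j with
  | nil => simp [altInner]
  | cons v rest ih =>
    simp only [altInner]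
    split
    · exact le_trans (ih _) (Nat.le_succ _)
    · simp

-- outer while over position i
def altOuter : List Int → Int → List (List Int)
  | [], _ => []
  | v :: rest, i =>
    if 0 < v then
      [i, (altInner rest (i + 1)).1] :: altOuter (altInner rest (i + 1)).2 ((altInner rest (i + 1)).1 + 1)
    else
      altOuter rest (i + 1)
termination_by l _ => l.length
decreasing_by
  · exact Nat.lt_succ_of_le (altInner_len rest (i + 1))
  · simp

def find_all_blocks_alt (sequence_hits : List Int) : List (List Int) :=
  altOuter sequence_hits 0

-- ===== PRECONDITION & SPEC =====
def Spec_find_all_blocks (sequence_hits : List Int) (out : List (List Int)) : Prop := out = find_all_blocks_alt sequence_hits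
instance (sequence_hits : List Int) (out : List (List Int)) : Decidable (Spec_find_all_blocks sequence_hits out) := by unfold Spec_find_all_blocks; infer_instance

-- ===== CLAIM (what is proved, stated in full; the proofs are below) =====
def Claim_equal_find_all_blocks : Prop := ∀ (sequence_hits : List Int), Dom_find_all_blocks sequence_hits → Spec_find_all_blocks sequence_hits (find_all_blocks sequence_hits)

-- ===== LEMMAS AND PROOFS =====
-- A's post-loop step: append the open block (ending at n) if still in one
def finishA (n : Int) (r : List (List Int) × Bool × Int) : List (List Int) :=
  if r.2.1 then r.1 ++ [[r.2.2, n]] else r.1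

theorem loop_both (l : List Int) (i : Int) :
    (∀ blocks cbs, finishA (i + l.length) (aLoop blocks false cbs i l) = blocks ++ altOuter l i) ∧
    (∀ blocks start, finishA (i + l.length) (aLoop blocks true start i l) =
      blocks ++ [start, (altInner l i).1] :: altOuter (altInner l i).2 ((altInner l i).1 + 1)) := by
  induction l generalizing i with
  | nil =>
    constructor
    · intro blocks cbs; simp [aLoop, finishA, altOuter]
    · intro blocks start; simp [aLoop, finishA, altInner, altOuter]
  | cons v rest ih =>
    constructor
    · intro blocks cbs
      by_cases hv : 0 < v
      · have h := (ih (i + 1)).2 blocks i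
        simp only [aLoop]
        rw [if_pos (by simp [hv])]
        simp only [List.length_cons] at *
        rw [show (i + ((rest.length : Nat) + 1 : Nat) : Int) = (i + 1) + rest.length by push_cast; ring]
        rw [h]
        simp [altOuter, hv]
      · have h := (ih (i + 1)).1 blocks cbs
        simp only [aLoop]
        rw [if_neg (by simp [hv]), if_neg (by simp)]
        simp only [List.length_cons] at *
        rw [show (i + ((rest.length : Nat) + 1 : Nat) : Int) = (i + 1) + rest.length by push_cast; ring]
        rw [h]
        simp [altOuter, hv]
    · intro blocks start
      by_cases hv : v = 0
      · have h := (ih (i + 1)).1 (blocks ++ [[start, i]]) start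
        simp only [aLoop]
        rw [if_neg (by simp), if_pos (by simp [hv])]
        simp only [List.length_cons] at *
        rw [show (i + ((rest.length : Nat) + 1 : Nat) : Int) = (i + 1) + rest.length by push_cast; ring]
        rw [h]
        simp [altInner, hv]
      · have h := (ih (i + 1)).2 blocks start
        simp only [aLoop]
        rw [if_neg (by simp), if_neg (by simp [hv])]
        simp only [List.length_cons] at *
        rw [show (i + ((rest.length : Nat) + 1 : Nat) : Int) = (i + 1) + rest.length by push_cast; ring]
        rw [h]
        simp [altInner, hv]

-- ===== VERDICT (by name: the statement is the Claim_ definition above) =====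
theorem find_all_blocks_spec : Claim_equal_find_all_blocks := by
  intro s _
  unfold Spec_find_all_blocks find_all_blocks find_all_blocks_alt
  have h := (loop_both s 0).1 [] 0
  simpa [finishA] using h
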